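-- pv_equiv track=rewrite | github.com/scurest/VagrantStoryImporter | import_vagrant_story.py | sort_seq_names
-- ===== SOURCE A (Python) =====
-- def sort_seq_names(seq_names):
--     # Sort .SEQ names, but put COM (common) SEQs first
--     # COMs usually have basic walk, stand, etc. actions
--
--     common = []
--     others = []
--
--     for name in seq_names:
--         if "COM" in name.upper():
--             common.append(name)
--         else:
--             others.append(name)
--
--     common.sort()
--     others.sort()
--
--     return common + others
-- ===== SOURCE B (Python) =====
-- def sort_seq_names(seq_names):
--     # Sort .SEQ names, but put COM (common) SEQs first
--     # One stable keyed sort: group 0 = names containing COM, group 1 = the rest,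
--     # the name itself as tiebreaker alphabetizes each group.
--     return sorted(seq_names, key=lambda n: (0 if "COM" in n.upper() else 1, n))
-- ===== Notes on version B (the rewrite author's own statement) =====
-- stated objective: idiomatic
-- what changed: Replaces the explicit partition loop plus two separate sorts and a concatenation with a single stable sorted() call keyed by the tuple (COM-group, name).
import Mathlib
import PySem

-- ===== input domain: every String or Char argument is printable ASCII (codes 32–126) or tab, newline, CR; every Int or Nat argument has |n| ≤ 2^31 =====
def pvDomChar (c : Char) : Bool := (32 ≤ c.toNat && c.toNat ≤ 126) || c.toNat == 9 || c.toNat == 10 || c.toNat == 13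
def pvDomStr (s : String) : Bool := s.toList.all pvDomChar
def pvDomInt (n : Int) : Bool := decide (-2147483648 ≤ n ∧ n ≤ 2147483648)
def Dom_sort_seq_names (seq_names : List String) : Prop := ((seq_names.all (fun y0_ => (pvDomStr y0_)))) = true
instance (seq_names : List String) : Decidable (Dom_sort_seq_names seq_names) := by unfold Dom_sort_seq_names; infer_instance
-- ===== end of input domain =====

-- One stable keyed sort (tuple key: COM-group, then the name) replaces A's partition loop + two sorts + concatenation; objective: idiomatic.


-- ===== PORT A =====
def sort_seq_names (seq_names : List String) : List String :=
  match seq_names.foldl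
    (fun (acc : List String × List String) name =>
      if PySem.Str.isIn "COM" (PySem.Str.upper name) then (acc.1 ++ [name], acc.2)
      else (acc.1, acc.2 ++ [name]))
    ([], []) with
  | (common, others) =>
    PySem.List.sorted common (fun x => x) ++ PySem.List.sorted others (fun x => x)

-- ===== PORT B =====
def sort_seq_names_alt (seq_names : List String) : List String :=
  PySem.List.sorted2 seq_names
    (fun n => if PySem.Str.isIn "COM" (PySem.Str.upper n) then (0 : Int) else 1)
    (fun n => n)

-- ===== PRECONDITION & SPEC =====
def Spec_sort_seq_names (seq_names : List String) (out : List String) : Prop := out = sort_seq_names_alt seq_names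
instance (seq_names : List String) (out : List String) : Decidable (Spec_sort_seq_names seq_names out) := by unfold Spec_sort_seq_names; infer_instance

-- ===== CLAIM (what is proved, stated in full; the proofs are below) =====
def Claim_equal_sort_seq_names : Prop := ∀ (seq_names : List String), Dom_sort_seq_names seq_names → Spec_sort_seq_names seq_names (sort_seq_names seq_names)

-- ===== LEMMAS AND PROOFS =====

-- predicate "COM in name.upper()", its 0/1 group, and the injective lexicographic key
def pP (n : String) : Bool := PySem.Str.isIn "COM" (PySem.Str.upper n)
def pG (n : String) : Int := if pP n then 0 else 1
def pKey (n : String) : Int ×ₗ String := toLex (pG n, n)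
def pLt (a b : String) : Bool := decide (pG a < pG b) || (!decide (pG b < pG a) && decide (a < b))

lemma alt_eq_foldl (xs : List String) :
    sort_seq_names_alt xs = xs.foldl (fun acc x => PySem.List.insertBy pLt x acc) [] := rfl

lemma pKey_inj : Function.Injective pKey := by
  intro a b h
  have := congrArg (fun x => (ofLex x).2) h
  simpa [pKey] using this

lemma pKey_le_iff (a b : String) : pKey a ≤ pKey b ↔ (pG a < pG b ∨ (pG a = pG b ∧ a ≤ b)) := by
  simp [pKey, Prod.Lex.toLex_le_toLex]

-- the partition loop in A computes the two filters
lemma partition_eq (xs : List String) (c o : List String) :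
    xs.foldl (fun (acc : List String × List String) name =>
        if pP name then (acc.1 ++ [name], acc.2) else (acc.1, acc.2 ++ [name])) (c, o)
      = (c ++ xs.filter pP, o ++ xs.filter (fun n => !pP n)) := by
  induction xs generalizing c o with
  | nil => simp
  | cons x xs ih =>
    by_cases h : pP x <;> simp [h, ih]

lemma insertBy_pairwise {α : Type} (R : α → α → Prop)
    (htrans : ∀ a b c, R a b → R b c → R a c)
    (before : α → α → Bool)
    (hT : ∀ a b, before a b = true → R a b)
    (hF : ∀ a b, before a b = false → R b a)
    (x : α) (ys : List α) (h : ys.Pairwise R) :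
    (PySem.List.insertBy before x ys).Pairwise R := by
  induction ys with
  | nil => simp [PySem.List.insertBy]
  | cons y ys ih =>
    rw [List.pairwise_cons] at h
    by_cases hb : before x y = true
    · rw [show PySem.List.insertBy before x (y :: ys) = x :: y :: ys from by
        simp [PySem.List.insertBy, hb]]
      refine List.pairwise_cons.2 ⟨?_, List.pairwise_cons.2 ⟨h.1, h.2⟩⟩
      intro z hz
      rcases List.mem_cons.1 hz with rfl | hz'
      · exact hT _ _ hb
      · exact htrans _ _ _ (hT _ _ hb) (h.1 z hz')
    · rw [show PySem.List.insertBy before x (y :: ys) = y :: PySem.List.insertBy before x ys from by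
        simp [PySem.List.insertBy, hb]]
      refine List.pairwise_cons.2 ⟨?_, ih h.2⟩
      intro z hz
      rcases (PySem.List.mem_insertBy before x z ys).1 hz with rfl | hz'
      · exact hF _ _ (by simpa using hb)
      · exact h.1 z hz'

lemma foldl_insertBy_pairwise {α : Type} (R : α → α → Prop)
    (htrans : ∀ a b c, R a b → R b c → R a c)
    (before : α → α → Bool)
    (hT : ∀ a b, before a b = true → R a b)
    (hF : ∀ a b, before a b = false → R b a)
    (xs acc : List α) (h : acc.Pairwise R) :
    (xs.foldl (fun acc x => PySem.List.insertBy before x acc) acc).Pairwise R := by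
  induction xs generalizing acc with
  | nil => simpa
  | cons x xs ih =>
    simpa using ih _ (insertBy_pairwise R htrans before hT hF x acc h)

lemma pLt_true {a b : String} (hab : pLt a b = true) : pKey a ≤ pKey b := by
  simp only [pLt, Bool.or_eq_true, Bool.and_eq_true, Bool.not_eq_true',
    decide_eq_true_eq, decide_eq_false_iff_not] at hab
  rw [pKey_le_iff]
  rcases hab with h | ⟨h1, h2⟩
  · exact Or.inl h
  · have hle : pG a ≤ pG b := not_lt.1 h1
    rcases lt_or_eq_of_le hle with h | h
    · exact Or.inl h
    · exact Or.inr ⟨h, le_of_lt h2⟩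

lemma pLt_false {a b : String} (hab : pLt a b = false) : pKey b ≤ pKey a := by
  simp only [pLt, Bool.or_eq_false_iff, Bool.and_eq_false_iff, Bool.not_eq_false',
    decide_eq_true_eq, decide_eq_false_iff_not] at hab
  obtain ⟨h1, h2⟩ := hab
  have hle : pG b ≤ pG a := not_lt.1 h1
  rw [pKey_le_iff]
  rcases lt_or_eq_of_le hle with h | h
  · exact Or.inl h
  · refine Or.inr ⟨h, ?_⟩
    rcases h2 with h2 | h2
    · rw [h] at h2
      exact absurd h2 (lt_irrefl _)
    · exact not_lt.1 h2

-- B's output is ordered by the lexicographic key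
lemma alt_pairwise (xs : List String) :
    (sort_seq_names_alt xs).Pairwise (fun a b => pKey a ≤ pKey b) := by
  rw [alt_eq_foldl]
  exact foldl_insertBy_pairwise (fun a b => pKey a ≤ pKey b)
    (fun a b c hab hbc => le_trans hab hbc) pLt
    (fun a b h => pLt_true h) (fun a b h => pLt_false h) xs [] List.Pairwise.nil

-- A's output, rewritten through the partition lemma
lemma a_eq (xs : List String) :
    sort_seq_names xs
      = PySem.List.sorted (xs.filter pP) (fun x => x)
        ++ PySem.List.sorted (xs.filter (fun n => !pP n)) (fun x => x) := by
  show (fun p : List String × List String =>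
      (PySem.List.sorted p.1 fun x => x) ++ PySem.List.sorted p.2 fun x => x)
    (xs.foldl (fun (acc : List String × List String) name =>
        if pP name then (acc.1 ++ [name], acc.2) else (acc.1, acc.2 ++ [name])) ([], []))
    = _
  rw [partition_eq]
  simp

lemma grp_of_mem_filter_true {x : String} {xs : List String}
    (h : x ∈ PySem.List.sorted (xs.filter pP) (fun y => y)) : pG x = 0 := by
  have hx : x ∈ xs.filter pP := (PySem.List.mem_sorted _ _ _ _).1 h
  have := (List.mem_filter.1 hx).2
  simp [pG, this]

lemma grp_of_mem_filter_false {x : String} {xs : List String}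
    (h : x ∈ PySem.List.sorted (xs.filter (fun n => !pP n)) (fun y => y)) : pG x = 1 := by
  have hx : x ∈ xs.filter (fun n => !pP n) := (PySem.List.mem_sorted _ _ _ _).1 h
  have := (List.mem_filter.1 hx).2
  simp only [Bool.not_eq_true'] at this
  simp [pG, this]

-- A's output is ordered by the same lexicographic key
lemma a_pairwise (xs : List String) :
    (sort_seq_names xs).Pairwise (fun a b => pKey a ≤ pKey b) := by
  rw [a_eq, List.pairwise_append]
  refine ⟨?_, ?_, ?_⟩
  · refine (PySem.List.sorted_pairwise (xs.filter pP) (fun y => y)).imp_of_mem ?_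
    intro a b ha hb hab
    rw [pKey_le_iff]
    exact Or.inr ⟨by rw [grp_of_mem_filter_true ha, grp_of_mem_filter_true hb], hab⟩
  · refine (PySem.List.sorted_pairwise (xs.filter (fun n => !pP n)) (fun y => y)).imp_of_mem ?_
    intro a b ha hb hab
    rw [pKey_le_iff]
    exact Or.inr ⟨by rw [grp_of_mem_filter_false ha, grp_of_mem_filter_false hb], hab⟩
  · intro a ha b hb
    rw [pKey_le_iff]
    rw [grp_of_mem_filter_true ha, grp_of_mem_filter_false hb]
    exact Or.inl (by norm_num)

lemma a_perm (xs : List String) : (sort_seq_names xs).Perm xs := by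
  rw [a_eq]
  exact ((PySem.List.sorted_perm _ _ false).append
    (PySem.List.sorted_perm _ _ false)).trans (List.filter_append_perm pP xs)

lemma alt_perm (xs : List String) : (sort_seq_names_alt xs).Perm xs :=
  PySem.List.sorted2_perm _ _ _ false

-- ===== VERDICT (by name: the statement is the Claim_ definition above) =====
theorem sort_seq_names_spec : Claim_equal_sort_seq_names := by
  intro xs _
  unfold Spec_sort_seq_names
  exact PySem.List.eq_of_perm_of_pairwise_le_of_injective pKey pKey_inj
    ((a_perm xs).trans (alt_perm xs).symm) (a_pairwise xs) (alt_pairwise xs)
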